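-- pv_equiv track=rewrite | github.com/Veteran-Googler/My_codes | Digit_recognizer/src/vectors_from_digits_extractor.py | normalize_vectors_counts
-- ===== SOURCE A (Python) =====
-- def normalize_vectors_counts(vectors, target_count):
--     if not vectors:
--         return vectors
--     current_count=len(vectors)
--     if current_count==target_count:
--         return vectors
--     elif current_count<target_count:
--         #repeat some vectors
--         difference=target_count - current_count
--         step=current_count//difference
--         index=0
--         while len(vectors)<target_count:
--             vectors.insert(index, vectors[index])
--             index=(index+step+1)%len(vectors)
--         return vectors
--     elif current_count>target_count:
--         #remove some vectors
--         difference=current_count - target_count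
--         step=current_count//difference
--         index=0
--         while len(vectors)>target_count:
--             vectors.pop(index)
--             index=(index+step)%len(vectors)
--         return vectors
-- ===== SOURCE B (Python) =====
-- # B: two-phase multiplicity simulation. Instead of mutating the vector list with
-- # O(n) insert/pop, simulate the same index walk on a per-original-element
-- # multiplicity array, then emit each original element the computed number of
-- # times. Mutates `vectors` in place like A does (same observable side effect).
--
-- def _owner(counts, p):
--     # index of the original element owning current position p
--     i = 0
--     while counts[i] <= p:
--         p -= counts[i]
--         i += 1
--     return i
--
-- def normalize_vectors_counts(vectors, target_count):
--     n = len(vectors)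
--     if n == 0 or n == target_count:
--         return vectors
--     counts = [1] * n
--     length, index = n, 0
--     if n < target_count:
--         step = n // (target_count - n)
--         while length < target_count:
--             counts[_owner(counts, index)] += 1
--             length += 1
--             index = (index + step + 1) % length
--     else:
--         step = n // (n - target_count)
--         while length > target_count:
--             counts[_owner(counts, index)] -= 1
--             length -= 1
--             index = (index + step) % length
--     vectors[:] = [v for v, c in zip(vectors, counts) for _ in range(c)]
--     return vectors
-- ===== Notes on version B (the rewrite author's own statement) =====
-- stated objective: alternative
-- what changed: B never mutates the vector list inside the loop: it simulates A's index walk on a per-original-element multiplicity array (finding the owner of the current position by a prefix-sum scan) and emits each original element its computed number of times in one final expansion pass.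
import Mathlib
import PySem

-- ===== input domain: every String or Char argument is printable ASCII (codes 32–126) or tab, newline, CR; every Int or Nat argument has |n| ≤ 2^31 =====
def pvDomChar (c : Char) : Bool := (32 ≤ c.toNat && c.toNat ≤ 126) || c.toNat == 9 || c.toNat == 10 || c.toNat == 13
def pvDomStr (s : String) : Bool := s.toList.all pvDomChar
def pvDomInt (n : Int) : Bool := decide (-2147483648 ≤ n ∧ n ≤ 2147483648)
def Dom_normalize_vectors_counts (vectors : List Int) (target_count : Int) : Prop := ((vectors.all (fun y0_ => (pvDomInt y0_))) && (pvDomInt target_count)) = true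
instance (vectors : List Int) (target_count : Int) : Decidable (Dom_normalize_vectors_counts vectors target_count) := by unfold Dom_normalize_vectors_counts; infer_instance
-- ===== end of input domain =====

-- B replaces A's in-place insert/pop loop by a two-phase multiplicity simulation
-- (per-original-element counts, then one expansion pass); objective: alternative
-- algorithm, not faster in CPython. A mutates its argument in place; the
-- equivalence proved here is about the RETURN value (Python B performs the same
-- in-place update via vectors[:] = …).

-- ===== PORT A =====
-- the while-loop of the growing branch: fuel = number of remaining insertions
def pvAGrow (target step : Int) : Nat → List Int → Int → List Int
  | 0, vs, _ => vs
  | fuel + 1, vs, index =>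
    if (vs.length : Int) < target then
      match PySem.List.pyGet? vs index with
      | some x =>
        let vs' := PySem.List.insert vs index x
        pvAGrow target step fuel vs' (PySem.Int.mod (index + step + 1) (vs'.length : Int))
      | none => vs   -- IndexError in Python (unreachable on Pre_)
    else vs

-- the while-loop of the removing branch: fuel = number of remaining pops
def pvAShrink (target step : Int) : Nat → List Int → Int → List Int
  | 0, vs, _ => vs
  | fuel + 1, vs, index =>
    if target < (vs.length : Int) then
      match PySem.List.pop? vs index with
      | some r =>
        pvAShrink target step fuel r.2 (PySem.Int.mod (index + step) (r.2.length : Int))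
      | none => vs   -- IndexError in Python (unreachable on Pre_)
    else vs

def normalize_vectors_counts (vectors : List Int) (target_count : Int) : List Int :=
  if vectors = [] then vectors
  else
    let current_count : Int := vectors.length
    if current_count = target_count then vectors
    else if current_count < target_count then
      let difference := target_count - current_count
      let step := PySem.Int.floordiv current_count difference
      pvAGrow target_count step (target_count - current_count).toNat vectors 0
    else
      let difference := current_count - target_count
      let step := PySem.Int.floordiv current_count difference
      pvAShrink target_count step (current_count - target_count).toNat vectors 0

-- ===== PORT B =====
-- _owner: index of the original element owning current position p
def pvOwner : List Int → Int → Nat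
  | [], _ => 0
  | c :: rest, p => if p < c then 0 else pvOwner rest (p - c) + 1

-- the growing while-loop over the counts array (state: counts, length, index)
def pvBGrow (target step : Int) : Nat → List Int → Int → Int → List Int
  | 0, cs, _, _ => cs
  | fuel + 1, cs, length, index =>
    if length < target then
      let cs' := cs.modify (pvOwner cs index) (· + 1)
      let length' := length + 1
      pvBGrow target step fuel cs' length' (PySem.Int.mod (index + step + 1) length')
    else cs

-- the removing while-loop over the counts array
def pvBShrink (target step : Int) : Nat → List Int → Int → Int → List Int
  | 0, cs, _, _ => cs
  | fuel + 1, cs, length, index =>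
    if target < length then
      let cs' := cs.modify (pvOwner cs index) (· - 1)
      let length' := length - 1
      pvBShrink target step fuel cs' length' (PySem.Int.mod (index + step) length')
    else cs

-- [v for v, c in zip(vectors, counts) for _ in range(c)]
def pvExpand (vs cs : List Int) : List Int :=
  (vs.zip cs).flatMap (fun p => List.replicate p.2.toNat p.1)

def normalize_vectors_counts_alt (vectors : List Int) (target_count : Int) : List Int :=
  let n : Int := vectors.length
  if vectors.length = 0 ∨ n = target_count then vectors
  else
    let counts := List.replicate vectors.length (1 : Int)
    if n < target_count then
      let step := PySem.Int.floordiv n (target_count - n)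
      pvExpand vectors (pvBGrow target_count step (target_count - n).toNat counts n 0)
    else
      let step := PySem.Int.floordiv n (n - target_count)
      pvExpand vectors (pvBShrink target_count step (n - target_count).toNat counts n 0)

-- ===== PRECONDITION & SPEC =====
-- Pre_ excludes nonempty vectors with target_count ≤ 0, on which A (and B alike)
-- raises ZeroDivisionError from `% len(vectors)` once the list has been emptied.
def Pre_normalize_vectors_counts (vectors : List Int) (target_count : Int) : Prop :=
  vectors = [] ∨ 1 ≤ target_count
instance (vectors : List Int) (target_count : Int) : Decidable (Pre_normalize_vectors_counts vectors target_count) := by unfold Pre_normalize_vectors_counts; infer_instance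
def pvWitness_normalize_vectors_counts : List Int × Int := ([3, 1, 2], 5)

def Spec_normalize_vectors_counts (vectors : List Int) (target_count : Int) (out : List Int) : Prop := out = normalize_vectors_counts_alt vectors target_count
instance (vectors : List Int) (target_count : Int) (out : List Int) : Decidable (Spec_normalize_vectors_counts vectors target_count out) := by unfold Spec_normalize_vectors_counts; infer_instance

-- ===== CLAIM (what is proved, stated in full; the proofs are below) =====
def Claim_equal_normalize_vectors_counts : Prop := ∀ (vectors : List Int) (target_count : Int), Dom_normalize_vectors_counts vectors target_count → Pre_normalize_vectors_counts vectors target_count → Spec_normalize_vectors_counts vectors target_count (normalize_vectors_counts vectors target_count)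

-- ===== LEMMAS AND PROOFS =====
theorem pvExpand_nil_right (vs : List Int) : pvExpand vs [] = [] := by
  cases vs <;> simp [pvExpand]

theorem pvExpand_cons (v c : Int) (vs cs : List Int) :
    pvExpand (v :: vs) (c :: cs) = List.replicate c.toNat v ++ pvExpand vs cs := by
  simp [pvExpand]

theorem pvModify_nonneg : ∀ (cs : List Int) (i : Nat), (∀ c ∈ cs, 0 ≤ c) →
    ∀ c ∈ cs.modify i (· + 1), 0 ≤ c
  | [], _, _ => by simp
  | c :: cs, 0, hnn => by
    intro x hx
    simp [List.modify] at hx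
    rcases hx with h | h
    · have := hnn c (by simp); omega
    · exact hnn x (by simp [h])
  | c :: cs, i + 1, hnn => by
    intro x hx
    simp [List.modify] at hx
    rcases hx with h | h
    · exact hnn x (by simp [h])
    · exact pvModify_nonneg cs i (fun c hc => hnn c (by simp [hc])) x h

theorem pvModify_dec_nonneg : ∀ (cs : List Int) (p : Int), (∀ c ∈ cs, 0 ≤ c) → 0 ≤ p →
    ∀ c ∈ cs.modify (pvOwner cs p) (· - 1), 0 ≤ c
  | [], _, _, _ => by simp
  | c :: cs, p, hnn, hp => by
    intro x hx
    by_cases hpc : p < c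
    · simp [pvOwner, hpc, List.modify] at hx
      rcases hx with h | h
      · omega
      · exact hnn x (by simp [h])
    · simp [pvOwner, hpc, List.modify] at hx
      rcases hx with h | h
      · exact hnn x (by simp [h])
      · exact pvModify_dec_nonneg cs (p - c) (fun c hc => hnn c (by simp [hc]))
          (by have := hnn c (by simp); omega) x h

theorem pvOwner_insert : ∀ (cs vs : List Int) (q : Nat) (x : Int),
    (∀ c ∈ cs, 0 ≤ c) → (pvExpand vs cs)[q]? = some x →
    PySem.List.insert (pvExpand vs cs) (q : Int) x
      = pvExpand vs (cs.modify (pvOwner cs (q : Int)) (· + 1))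
  | [], vs, q, x, hnn, hx => by simp [pvExpand_nil_right] at hx
  | c :: cs, [], q, x, hnn, hx => by simp [pvExpand] at hx
  | c :: cs, v :: vs, q, x, hnn, hx => by
    have hc : 0 ≤ c := hnn c (by simp)
    rw [pvExpand_cons] at hx ⊢
    have hqlen : q < c.toNat + (pvExpand vs cs).length := by
      have := List.getElem?_eq_some_iff.mp hx
      obtain ⟨h, _⟩ := this
      simpa using h
    by_cases hq : (q : Int) < c
    · have hqc : q < c.toNat := by omega
      have hxv : x = v := by
        rw [List.getElem?_append_left (by simpa using hqc), List.getElem?_replicate] at hx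
        simp [hqc] at hx; omega
      subst hxv
      have howner : pvOwner (c :: cs) (q : Int) = 0 := by simp [pvOwner, hq]
      rw [howner, show (c :: cs).modify 0 (· + 1) = (c + 1) :: cs by simp [List.modify],
        pvExpand_cons]
      rw [PySem.List.insert_natCast _ _ _ (by simp; omega)]
      rw [List.take_append, List.drop_append, List.take_replicate, List.drop_replicate]
      simp only [List.length_replicate]
      rw [show min q c.toNat = q by omega, show q - c.toNat = 0 by omega]
      simp only [List.take_zero, List.append_nil, List.drop_zero]
      rw [show (c + 1).toNat = q + ((c.toNat - q) + 1) by omega,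
        List.replicate_add, List.replicate_succ]
      simp
    · have hqc : c.toNat ≤ q := by omega
      have hx' : (pvExpand vs cs)[q - c.toNat]? = some x := by
        rw [List.getElem?_append_right (by simpa using hqc)] at hx
        simpa using hx
      have howner : pvOwner (c :: cs) (q : Int) = pvOwner cs ((q : Int) - c) + 1 := by
        simp [pvOwner, hq]
      have hcast : (q : Int) - c = ((q - c.toNat : Nat) : Int) := by omega
      rw [howner, hcast,
        show (c :: cs).modify (pvOwner cs ((q - c.toNat : Nat) : Int) + 1) (· + 1)
          = c :: cs.modify (pvOwner cs ((q - c.toNat : Nat) : Int)) (· + 1) by simp [List.modify],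
        pvExpand_cons]
      have hIH := pvOwner_insert cs vs (q - c.toNat) x (fun c hc => hnn c (by simp [hc])) hx'
      have hlen' : q - c.toNat < (pvExpand vs cs).length := by
        obtain ⟨h, _⟩ := List.getElem?_eq_some_iff.mp hx'
        exact h
      rw [PySem.List.insert_natCast _ _ _ (by simp; omega)] at hIH ⊢
      rw [List.take_append, List.drop_append, List.take_replicate, List.drop_replicate]
      simp only [List.length_replicate]
      rw [show min q c.toNat = c.toNat by omega, show c.toNat - q = 0 by omega]
      simp only [List.replicate_zero, List.nil_append, List.append_assoc]
      rw [hIH]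

theorem pvOwner_erase : ∀ (cs vs : List Int) (q : Nat),
    (∀ c ∈ cs, 0 ≤ c) → q < (pvExpand vs cs).length →
    (pvExpand vs cs).eraseIdx q
      = pvExpand vs (cs.modify (pvOwner cs (q : Int)) (· - 1))
  | [], vs, q, hnn, h => by simp [pvExpand_nil_right] at h
  | c :: cs, [], q, hnn, h => by simp [pvExpand] at h
  | c :: cs, v :: vs, q, hnn, h => by
    have hc : 0 ≤ c := hnn c (by simp)
    rw [pvExpand_cons] at h ⊢
    have hqlen : q < c.toNat + (pvExpand vs cs).length := by simpa using h
    rw [List.eraseIdx_eq_take_drop_succ]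
    by_cases hq : (q : Int) < c
    · have hqc : q < c.toNat := by omega
      have howner : pvOwner (c :: cs) (q : Int) = 0 := by simp [pvOwner, hq]
      rw [howner, show (c :: cs).modify 0 (· - 1) = (c - 1) :: cs by simp [List.modify],
        pvExpand_cons]
      rw [List.take_append, List.drop_append, List.take_replicate, List.drop_replicate]
      simp only [List.length_replicate]
      rw [show min q c.toNat = q by omega, show q - c.toNat = 0 by omega,
        show q + 1 - c.toNat = 0 by omega]
      simp only [List.take_zero, List.append_nil, List.drop_zero]
      rw [show (c - 1).toNat = q + (c.toNat - (q + 1)) by omega, List.replicate_add,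
        List.append_assoc]
    · have hqc : c.toNat ≤ q := by omega
      have howner : pvOwner (c :: cs) (q : Int) = pvOwner cs ((q : Int) - c) + 1 := by
        simp [pvOwner, hq]
      have hcast : (q : Int) - c = ((q - c.toNat : Nat) : Int) := by omega
      rw [howner, hcast,
        show (c :: cs).modify (pvOwner cs ((q - c.toNat : Nat) : Int) + 1) (· - 1)
          = c :: cs.modify (pvOwner cs ((q - c.toNat : Nat) : Int)) (· - 1) by simp [List.modify],
        pvExpand_cons]
      have hIH := pvOwner_erase cs vs (q - c.toNat) (fun c hc => hnn c (by simp [hc]))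
        (by omega)
      rw [List.eraseIdx_eq_take_drop_succ] at hIH
      rw [List.take_append, List.drop_append, List.take_replicate, List.drop_replicate]
      simp only [List.length_replicate]
      rw [show min q c.toNat = c.toNat by omega, show c.toNat - (q + 1) = 0 by omega,
        show q + 1 - c.toNat = q - c.toNat + 1 by omega]
      simp only [List.replicate_zero, List.nil_append, List.append_assoc]
      rw [hIH]

theorem pvGrow_sim (target step : Int) (vs : List Int) :
    ∀ (fuel : Nat) (cs : List Int) (index : Int),
    (∀ c ∈ cs, 0 ≤ c) →
    0 ≤ index → index < ((pvExpand vs cs).length : Int) →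
    pvAGrow target step fuel (pvExpand vs cs) index
      = pvExpand vs (pvBGrow target step fuel cs ((pvExpand vs cs).length : Int) index)
  | 0, cs, index, hnn, h0, hlt => rfl
  | fuel + 1, cs, index, hnn, h0, hlt => by
    obtain ⟨q, rfl⟩ : ∃ q : Nat, index = (q : Int) := ⟨index.toNat, by omega⟩
    have hq : q < (pvExpand vs cs).length := by exact_mod_cast hlt
    rw [pvAGrow, pvBGrow]
    by_cases hcond : ((pvExpand vs cs).length : Int) < target
    · rw [if_pos hcond, if_pos hcond]
      have hget : PySem.List.pyGet? (pvExpand vs cs) (q : Int)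
          = some ((pvExpand vs cs)[q]'hq) := by
        rw [PySem.List.pyGet?_natCast]
        exact List.getElem?_eq_getElem hq
      rw [hget]
      have hins := pvOwner_insert cs vs q ((pvExpand vs cs)[q]'hq) hnn
        (List.getElem?_eq_getElem hq)
      simp only []
      rw [hins]
      have hlen1 : (PySem.List.insert (pvExpand vs cs) (q : Int)
          ((pvExpand vs cs)[q]'hq)).length = (pvExpand vs cs).length + 1 :=
        PySem.List.length_insert ..
      have hlen' : (pvExpand vs (cs.modify (pvOwner cs (q : Int)) (· + 1))).length
          = (pvExpand vs cs).length + 1 := by rw [← hins]; exact hlen1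
      have hcast : ((pvExpand vs (cs.modify (pvOwner cs (q : Int)) (· + 1))).length : Int)
          = ((pvExpand vs cs).length : Int) + 1 := by rw [hlen']; push_cast; ring
      have hpos : (0 : Int) < ((pvExpand vs cs).length : Int) + 1 := by positivity
      have hIH := pvGrow_sim target step vs fuel
        (cs.modify (pvOwner cs (q : Int)) (· + 1))
        (PySem.Int.mod ((q : Int) + step + 1) (((pvExpand vs cs).length : Int) + 1))
        (pvModify_nonneg cs _ hnn)
        (PySem.Int.mod_nonneg _ hpos)
        (by rw [hcast]; exact PySem.Int.mod_lt _ hpos)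
      rw [hcast] at hIH ⊢
      exact hIH
    · rw [if_neg hcond, if_neg hcond]

theorem pvShrink_sim (target step : Int) (vs : List Int) (htar : 1 ≤ target) :
    ∀ (fuel : Nat) (cs : List Int) (index : Int),
    (∀ c ∈ cs, 0 ≤ c) →
    0 ≤ index → index < ((pvExpand vs cs).length : Int) →
    pvAShrink target step fuel (pvExpand vs cs) index
      = pvExpand vs (pvBShrink target step fuel cs ((pvExpand vs cs).length : Int) index)
  | 0, cs, index, hnn, h0, hlt => rfl
  | fuel + 1, cs, index, hnn, h0, hlt => by
    obtain ⟨q, rfl⟩ : ∃ q : Nat, index = (q : Int) := ⟨index.toNat, by omega⟩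
    have hq : q < (pvExpand vs cs).length := by exact_mod_cast hlt
    rw [pvAShrink, pvBShrink]
    by_cases hcond : target < ((pvExpand vs cs).length : Int)
    · rw [if_pos hcond, if_pos hcond]
      have hpop : PySem.List.pop? (pvExpand vs cs) (q : Int)
          = some ((pvExpand vs cs)[q]'hq, (pvExpand vs cs).eraseIdx q) :=
        PySem.List.pop?_natCast _ _ hq
      rw [hpop]
      have hera := pvOwner_erase cs vs q hnn hq
      simp only []
      rw [hera]
      have hge : 1 ≤ (pvExpand vs cs).length := by omega
      have hlen' : (pvExpand vs (cs.modify (pvOwner cs (q : Int)) (· - 1))).length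
          = (pvExpand vs cs).length - 1 := by
        rw [← hera, List.length_eraseIdx]; simp [hq]
      have hcast : ((pvExpand vs (cs.modify (pvOwner cs (q : Int)) (· - 1))).length : Int)
          = ((pvExpand vs cs).length : Int) - 1 := by
        rw [hlen', Nat.cast_sub hge]; norm_num
      have hpos : (0 : Int) < ((pvExpand vs cs).length : Int) - 1 := by omega
      have hIH := pvShrink_sim target step vs htar fuel
        (cs.modify (pvOwner cs (q : Int)) (· - 1))
        (PySem.Int.mod ((q : Int) + step) (((pvExpand vs cs).length : Int) - 1))
        (pvModify_dec_nonneg cs (q : Int) hnn (by positivity))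
        (PySem.Int.mod_nonneg _ hpos)
        (by rw [hcast]; exact PySem.Int.mod_lt _ hpos)
      rw [hcast] at hIH ⊢
      exact hIH
    · rw [if_neg hcond, if_neg hcond]

theorem pvExpand_ones (vs : List Int) : pvExpand vs (List.replicate vs.length 1) = vs := by
  induction vs with
  | nil => rfl
  | cons v vs ih => simpa [pvExpand, List.replicate_succ] using ih

-- ===== VERDICT (by name: the statement is the Claim_ definition above) =====
theorem normalize_vectors_counts_spec : Claim_equal_normalize_vectors_counts := by
  intro vectors target_count _ hpre
  unfold Spec_normalize_vectors_counts normalize_vectors_counts normalize_vectors_counts_alt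
  by_cases hnil : vectors = []
  · subst hnil; simp
  · have hlen0 : vectors.length ≠ 0 := by simpa [List.length_eq_zero_iff] using hnil
    have htar : (1 : Int) ≤ target_count := hpre.resolve_left hnil
    rw [if_neg hnil]
    simp only []
    by_cases heq : (vectors.length : Int) = target_count
    · rw [if_pos heq, if_pos (Or.inr heq)]
    · rw [if_neg heq, if_neg (not_or.mpr ⟨hlen0, heq⟩)]
      have hones : ∀ c ∈ List.replicate vectors.length (1 : Int), 0 ≤ c := by
        intro c hc; simp at hc; omega
      have hpos0 : (0 : Int) < ((pvExpand vectors (List.replicate vectors.length 1)).length : Int) := by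
        rw [pvExpand_ones]; exact_mod_cast Nat.pos_of_ne_zero hlen0
      by_cases hlt : (vectors.length : Int) < target_count
      · rw [if_pos hlt, if_pos hlt]
        have hsim := pvGrow_sim target_count
          (PySem.Int.floordiv (vectors.length : Int) (target_count - (vectors.length : Int)))
          vectors ((target_count - (vectors.length : Int)).toNat)
          (List.replicate vectors.length 1) 0 hones le_rfl hpos0
        rw [pvExpand_ones] at hsim
        exact hsim
      · rw [if_neg hlt, if_neg hlt]
        have hsim := pvShrink_sim target_count
          (PySem.Int.floordiv (vectors.length : Int) ((vectors.length : Int) - target_count))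
          vectors htar ((vectors.length : Int) - target_count).toNat
          (List.replicate vectors.length 1) 0 hones le_rfl hpos0
        rw [pvExpand_ones] at hsim
        exact hsim
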